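-- pv_equiv track=rewrite | github.com/pelmenx/Daily_Coding_Problem | Solutions/Daily Coding Problem: Problem #255 [Easy].py | get_matrix2
-- ===== SOURCE A (Python) =====
-- def get_matrix2(array):
--     def update_matrix(current_row, row):
--         for col in array[current_row]:
--             if col not in visited:
--                 matrix[row][col] = 1
--                 visited.add(col)
--                 update_matrix(col, row)
--
--     matrix = [[0 for _ in range(len(array))] for _ in range(len(array))]
--     visited = set()
--     for i in range(len(array)):
--         update_matrix(i, i)
--         visited.clear()
--     return matrix
-- ===== SOURCE B (Python) =====
-- def get_matrix2(array):
--     n = len(array)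
--     matrix = []
--     for i in range(n):
--         frontier = set(array[i])
--         seen = set(frontier)
--         while frontier:
--             nxt = set()
--             for v in frontier:
--                 for c in array[v]:
--                     if c not in seen:
--                         nxt.add(c)
--             for c in nxt:
--                 seen.add(c)
--             frontier = nxt
--         row = [0] * n
--         for c in seen:
--             row[c] = 1
--         matrix.append(row)
--     return matrix
-- ===== Notes on version B (the rewrite author's own statement) =====
-- stated objective: alternative
-- what changed: Replaces the per-start-node recursive DFS that writes matrix cells during the traversal (update_matrix) by an iterative frontier/level-set saturation loop that first computes the reachable set with no recursion, then fills the row from that set.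
import Mathlib
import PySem

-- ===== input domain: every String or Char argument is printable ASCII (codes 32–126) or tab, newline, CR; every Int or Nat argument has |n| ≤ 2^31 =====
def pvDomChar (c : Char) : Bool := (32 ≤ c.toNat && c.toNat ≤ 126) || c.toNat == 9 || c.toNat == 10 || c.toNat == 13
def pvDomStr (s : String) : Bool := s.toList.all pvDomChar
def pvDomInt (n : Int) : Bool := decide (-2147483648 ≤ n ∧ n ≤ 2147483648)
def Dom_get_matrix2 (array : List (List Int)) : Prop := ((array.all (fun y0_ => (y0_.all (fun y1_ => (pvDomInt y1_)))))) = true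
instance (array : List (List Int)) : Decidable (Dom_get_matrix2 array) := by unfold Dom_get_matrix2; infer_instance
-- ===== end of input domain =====

-- B replaces A's per-start-node recursive DFS by an iterative frontier (level-set) saturation loop; objective: alternative
-- (no speed claim). Equivalence of the RETURN value; neither implementation mutates its argument.

-- array[v] — shared transliteration of the Python subscript (both sources index the same way)
def pvNb (array : List (List Int)) (v : Int) : List Int :=
  (PySem.List.pyGet? array v).getD []

-- ===== PORT A =====
-- update_matrix(current_row, row): the for-loop over array[current_row] unrolled on the neighbour list;
-- fuel only makes the recursion structural (each dive adds a fresh element to visited, so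
-- array.flatten.length + 1 can never be exhausted); Python needs no fuel.
def pvUpdA (array : List (List Int)) :
    Nat → List Int → Int → PySem.Set Int → List (List Int) → PySem.Set Int × List (List Int)
  | _, [], _, vis, mat => (vis, mat)
  | 0, _ :: _, _, vis, mat => (vis, mat)
  | f+1, col :: rest, row, vis, mat =>
    if PySem.Set.contains vis col then
      pvUpdA array (f+1) rest row vis mat
    else
      let mat' := PySem.List.pySetD mat row
        (PySem.List.pySetD (PySem.List.pyGetD mat row []) col 1)  -- matrix[row][col] = 1
      let st := pvUpdA array f (pvNb array col) row (PySem.Set.add vis col) mat'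
      pvUpdA array (f+1) rest row st.1 st.2
  termination_by f cols => (f, cols.length)

def get_matrix2 (array : List (List Int)) : List (List Int) :=
  let n : Int := (array.length : Int)
  let mat0 := (PySem.List.pyRange 0 n 1).map (fun _ => (PySem.List.pyRange 0 n 1).map (fun _ => (0 : Int)))
  let fuel := array.flatten.length + 1
  ((PySem.List.pyRange 0 n 1).foldl
      (fun st i => ((PySem.Set.empty : PySem.Set Int), (pvUpdA array fuel (pvNb array i) i st.1 st.2).2))
      ((PySem.Set.empty : PySem.Set Int), mat0)).2

-- ===== PORT B =====
-- inner 'for c in array[v]: if c not in seen: nxt.add(c)'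
def pvNextRow (seen : PySem.Set Int) : List Int → PySem.Set Int → PySem.Set Int
  | [], nxt => nxt
  | c :: rest, nxt =>
    pvNextRow seen rest (if PySem.Set.contains seen c then nxt else PySem.Set.add nxt c)

-- 'for v in frontier: …'
def pvNext (array : List (List Int)) (seen : PySem.Set Int) : List Int → PySem.Set Int → PySem.Set Int
  | [], nxt => nxt
  | v :: rest, nxt => pvNext array seen rest (pvNextRow seen (pvNb array v) nxt)

-- 'while frontier: …' (fuel: the seen set grows while the frontier is nonempty, so
-- array.flatten.length + 2 can never be exhausted; Python needs no fuel)
def pvLoopB (array : List (List Int)) : Nat → PySem.Set Int → PySem.Set Int → PySem.Set Int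
  | 0, seen, _ => seen
  | f+1, seen, frontier =>
    if frontier.isEmpty then seen
    else
      let nxt := pvNext array seen frontier PySem.Set.empty
      pvLoopB array f (PySem.Set.update seen nxt) nxt  -- 'for c in nxt: seen.add(c)'

-- 'row = [0] * n; for c in seen: row[c] = 1'
def pvRowB (n : Int) (seen : PySem.Set Int) : List Int :=
  seen.foldl (fun r c => PySem.List.pySetD r c 1) (List.replicate n.toNat 0)

def get_matrix2_alt (array : List (List Int)) : List (List Int) :=
  let n : Int := (array.length : Int)
  (PySem.List.pyRange 0 n 1).foldl
    (fun mat i =>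
      let frontier := PySem.Set.ofList (pvNb array i)
      let seen := PySem.Set.ofList (frontier : List Int)
      let seen' := pvLoopB array (array.flatten.length + 2) seen frontier
      mat ++ [pvRowB n seen'])
    []

-- ===== PRECONDITION & SPEC =====
-- Python A raises IndexError as soon as any entry c of any row fails -n ≤ c < n (the write
-- matrix[i][c] = 1 is reached for every entry of every row, and out-of-range entries are never
-- in visited), so Pre_ is exactly the inputs on which A returns.
def Pre_get_matrix2 (array : List (List Int)) : Prop :=
  ∀ r ∈ array, ∀ c ∈ r, -(array.length : Int) ≤ c ∧ c < (array.length : Int)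
instance (array : List (List Int)) : Decidable (Pre_get_matrix2 array) := by
  unfold Pre_get_matrix2; infer_instance

def pvWitness_get_matrix2 : List (List Int) := [[1], [0]]

def Spec_get_matrix2 (array : List (List Int)) (out : List (List Int)) : Prop := out = get_matrix2_alt array
instance (array : List (List Int)) (out : List (List Int)) : Decidable (Spec_get_matrix2 array out) := by unfold Spec_get_matrix2; infer_instance

-- ===== CLAIM (what is proved, stated in full; the proofs are below) =====
def Claim_equal_get_matrix2 : Prop := ∀ (array : List (List Int)), Dom_get_matrix2 array → Pre_get_matrix2 array → Spec_get_matrix2 array (get_matrix2 array)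

-- ===== LEMMAS AND PROOFS =====
-- reachability from a seed list of columns (the semantics both traversals compute)
inductive pvRchL (array : List (List Int)) (cols : List Int) : Int → Prop
  | base {x : Int} : x ∈ cols → pvRchL array cols x
  | step {v x : Int} : pvRchL array cols v → x ∈ pvNb array v → pvRchL array cols x

-- the visited-set component of A's recursion, on its own
def pvVisA (array : List (List Int)) : Nat → List Int → PySem.Set Int → PySem.Set Int
  | _, [], vis => vis
  | 0, _ :: _, vis => vis
  | f+1, col :: rest, vis =>
    if PySem.Set.contains vis col then pvVisA array (f+1) rest vis
    else pvVisA array (f+1) rest (pvVisA array f (pvNb array col) (PySem.Set.add vis col))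
  termination_by f cols => (f, cols.length)

lemma pvNb_subset (array : List (List Int)) (v : Int) : ∀ x ∈ pvNb array v, x ∈ array.flatten := by
  intro x hx
  unfold pvNb at hx
  cases hg : PySem.List.pyGet? array v with
  | none => simp [hg] at hx
  | some r =>
    simp only [hg, Option.getD_some] at hx
    exact List.mem_flatten.2 ⟨r, PySem.List.mem_of_pyGet?_eq_some array hg, hx⟩

lemma pvSubNodupLen {l m : List Int} (hn : l.Nodup) (hs : ∀ x ∈ l, x ∈ m) :
    l.length ≤ m.toFinset.card := by
  calc l.length = l.toFinset.card := (List.toFinset_card_of_nodup hn).symm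
    _ ≤ m.toFinset.card := Finset.card_le_card (fun x hx => by
        simp only [List.mem_toFinset] at *; exact hs x hx)

lemma pvIdxLt {n : Nat} {i : Int} {k : Nat} (h : PySem.List.pyIdx? n i = some k) : k < n := by
  unfold PySem.List.pyIdx? at h
  split_ifs at h with h1 h2 h3 <;> simp_all <;> omega

lemma pvMark_getElem? (r : List Int) (c : Int) (k : Nat) :
    (PySem.List.pySetD r c 1)[k]? =
      if PySem.List.pyIdx? r.length c = some k then some 1 else r[k]? := by
  unfold PySem.List.pySetD PySem.List.pySet?
  cases hg : PySem.List.pyIdx? r.length c with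
  | none => simp
  | some m =>
    have hm : m < r.length := pvIdxLt hg
    simp only [Option.map_some, Option.getD_some, List.getElem?_set]
    by_cases hk : m = k
    · subst hk; simp [hm]
    · simp [hk]

lemma pvSetRow_getElem? (mat : List (List Int)) (row : Int) (x : List Int) (j : Nat) (h : 0 ≤ row) :
    (PySem.List.pySetD mat row x)[j]? =
      if j = row.toNat ∧ j < mat.length then some x else mat[j]? := by
  unfold PySem.List.pySetD PySem.List.pySet? PySem.List.pyIdx?
  by_cases hr : row < (mat.length : Int)
  · have ht : row.toNat < mat.length := by omega
    have hc : (if 0 ≤ row then if row < (mat.length : Int) then some row.toNat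
        else none else if -(mat.length : Int) ≤ row then some (mat.length - (-row).toNat) else none)
        = some row.toNat := by
      rw [if_pos h, if_pos hr]
    rw [hc]
    simp only [Option.map_some, Option.getD_some, List.getElem?_set]
    by_cases hj : row.toNat = j
    · subst hj; simp [ht]
    · rw [if_neg hj, if_neg (by rintro ⟨rfl, _⟩; exact hj rfl)]
  · have hc : (if 0 ≤ row then if row < (mat.length : Int) then some row.toNat
        else none else if -(mat.length : Int) ≤ row then some (mat.length - (-row).toNat) else none)
        = none := by
      rw [if_pos h, if_neg hr]
    rw [hc]
    simp only [Option.map_none, Option.getD_none]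
    have : ¬ (j = row.toNat ∧ j < mat.length) := by rintro ⟨rfl, h2⟩; omega
    rw [if_neg this]

lemma pvRchL_mono {array : List (List Int)} {cols cols' : List Int} (h : ∀ x ∈ cols, x ∈ cols')
    {x : Int} (hx : pvRchL array cols x) : pvRchL array cols' x := by
  induction hx with
  | base hb => exact pvRchL.base (h _ hb)
  | step _ hnb ih => exact pvRchL.step ih hnb

lemma pvRchL_lift {array : List (List Int)} {cols : List Int} {col x : Int} (hc : col ∈ cols)
    (hx : pvRchL array (pvNb array col) x) : pvRchL array cols x := by
  induction hx with
  | base hb => exact pvRchL.step (pvRchL.base hc) hb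
  | step _ hnb ih => exact pvRchL.step ih hnb

lemma pvVisA_mono (array : List (List Int)) :
    ∀ (f : Nat) (cols : List Int) (vis : PySem.Set Int),
      ∀ x ∈ vis, x ∈ pvVisA array f cols vis := by
  intro f
  induction f with
  | zero => intro cols vis x hx; cases cols <;> simpa [pvVisA] using hx
  | succ f ihf =>
    intro cols
    induction cols with
    | nil => intro vis x hx; simpa [pvVisA] using hx
    | cons col rest ihc =>
      intro vis x hx
      by_cases hcol : PySem.Set.contains vis col
      · rw [pvVisA, if_pos hcol]; exact ihc vis x hx
      · rw [pvVisA, if_neg hcol]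
        exact ihc _ x (ihf _ _ x (by simp [PySem.Set.mem_add]; exact Or.inl hx))

lemma pvVisA_nodup (array : List (List Int)) :
    ∀ (f : Nat) (cols : List Int) (vis : PySem.Set Int),
      vis.Nodup → (pvVisA array f cols vis).Nodup := by
  intro f
  induction f with
  | zero => intro cols vis h; cases cols <;> simpa [pvVisA] using h
  | succ f ihf =>
    intro cols
    induction cols with
    | nil => intro vis h; simpa [pvVisA] using h
    | cons col rest ihc =>
      intro vis h
      by_cases hcol : PySem.Set.contains vis col
      · rw [pvVisA, if_pos hcol]; exact ihc vis h
      · rw [pvVisA, if_neg hcol]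
        exact ihc _ (ihf _ _ (PySem.Set.nodup_add vis col h))

lemma pvVisA_subU (array : List (List Int)) :
    ∀ (f : Nat) (cols : List Int) (vis : PySem.Set Int),
      (∀ x ∈ vis, x ∈ array.flatten) → (∀ x ∈ cols, x ∈ array.flatten) →
      ∀ x ∈ pvVisA array f cols vis, x ∈ array.flatten := by
  intro f
  induction f with
  | zero => intro cols vis hv _ x hx; cases cols <;> exact hv x (by simpa [pvVisA] using hx)
  | succ f ihf =>
    intro cols
    induction cols with
    | nil => intro vis hv _ x hx; exact hv x (by simpa [pvVisA] using hx)
    | cons col rest ihc =>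
      intro vis hv hc x hx
      by_cases hcol : PySem.Set.contains vis col
      · rw [pvVisA, if_pos hcol] at hx
        exact ihc vis hv (fun y hy => hc y (List.mem_cons_of_mem _ hy)) x hx
      · rw [pvVisA, if_neg hcol] at hx
        refine ihc _ ?_ (fun y hy => hc y (List.mem_cons_of_mem _ hy)) x hx
        refine ihf _ _ ?_ (pvNb_subset array col) 
        intro y hy
        rcases (PySem.Set.mem_add _ _ _).1 hy with h1 | rfl
        · exact hv y h1
        · exact hc y (List.mem_cons_self)

lemma pvVisA_sound (array : List (List Int)) :
    ∀ (f : Nat) (cols : List Int) (vis : PySem.Set Int) (x : Int),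
      x ∈ pvVisA array f cols vis → x ∈ vis ∨ pvRchL array cols x := by
  intro f
  induction f with
  | zero => intro cols vis x hx; cases cols <;> exact Or.inl (by simpa [pvVisA] using hx)
  | succ f ihf =>
    intro cols
    induction cols with
    | nil => intro vis x hx; exact Or.inl (by simpa [pvVisA] using hx)
    | cons col rest ihc =>
      intro vis x hx
      by_cases hcol : PySem.Set.contains vis col
      · rw [pvVisA, if_pos hcol] at hx
        rcases ihc vis x hx with h | h
        · exact Or.inl h
        · exact Or.inr (pvRchL_mono (fun y hy => List.mem_cons_of_mem _ hy) h)
      · rw [pvVisA, if_neg hcol] at hx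
        rcases ihc _ x hx with h | h
        · rcases ihf _ _ x h with h2 | h2
          · rcases (PySem.Set.mem_add _ _ _).1 h2 with h3 | rfl
            · exact Or.inl h3
            · exact Or.inr (pvRchL.base List.mem_cons_self)
          · exact Or.inr (pvRchL_lift List.mem_cons_self h2)
        · exact Or.inr (pvRchL_mono (fun y hy => List.mem_cons_of_mem _ hy) h)

lemma pvVisA_closed (array : List (List Int)) :
    ∀ (f : Nat) (cols : List Int) (vis : PySem.Set Int),
      vis.Nodup → (∀ x ∈ vis, x ∈ array.flatten) → (∀ x ∈ cols, x ∈ array.flatten) →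
      array.flatten.toFinset.card + 1 ≤ f + vis.length →
      (∀ x ∈ cols, x ∈ pvVisA array f cols vis) ∧
      (∀ x ∈ pvVisA array f cols vis, x ∈ vis ∨ ∀ y ∈ pvNb array x, y ∈ pvVisA array f cols vis) := by
  intro f
  induction f with
  | zero =>
    intro cols vis hn hv _ hfuel
    exact absurd (pvSubNodupLen hn hv) (by omega)
  | succ f ihf =>
    intro cols
    induction cols with
    | nil =>
      intro vis hn hv hc hfuel
      refine ⟨by simp, ?_⟩
      intro x hx
      exact Or.inl (by simpa [pvVisA] using hx)
    | cons col rest ihc =>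
      intro vis hn hv hc hfuel
      have hcU : col ∈ array.flatten := hc col List.mem_cons_self
      have hrU : ∀ y ∈ rest, y ∈ array.flatten := fun y hy => hc y (List.mem_cons_of_mem _ hy)
      by_cases hcol : PySem.Set.contains vis col
      · rw [pvVisA, if_pos hcol]
        obtain ⟨C1, C2⟩ := ihc vis hn hv hrU hfuel
        refine ⟨?_, C2⟩
        intro x hx
        rcases List.mem_cons.1 hx with rfl | hx
        · exact pvVisA_mono array _ _ _ x ((PySem.Set.contains_iff _ _).1 hcol)
        · exact C1 x hx
      · rw [pvVisA, if_neg hcol]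
        have hcol' : col ∉ vis := fun hm => hcol ((PySem.Set.contains_iff _ _).2 hm)
        have hadd : PySem.Set.add vis col = vis ++ [col] := PySem.Set.add_of_not_mem hcol'
        have hlen1 : (PySem.Set.add vis col).length = vis.length + 1 := by simp [hadd]
        have hn1 : (PySem.Set.add vis col).Nodup := PySem.Set.nodup_add vis col hn
        have hv1 : ∀ x ∈ PySem.Set.add vis col, x ∈ array.flatten := by
          intro x hx
          rcases (PySem.Set.mem_add _ _ _).1 hx with h1 | rfl
          · exact hv x h1
          · exact hcU
        have hf1 : array.flatten.toFinset.card + 1 ≤ f + (PySem.Set.add vis col).length := by omega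
        obtain ⟨D1, D2⟩ := ihf (pvNb array col) (PySem.Set.add vis col) hn1 hv1 (pvNb_subset array col) hf1
        set vis2 := pvVisA array f (pvNb array col) (PySem.Set.add vis col) with hvis2
        have hn2 : vis2.Nodup := pvVisA_nodup array _ _ _ hn1
        have hv2 : ∀ x ∈ vis2, x ∈ array.flatten := pvVisA_subU array _ _ _ hv1 (pvNb_subset array col)
        have hm2 : ∀ x ∈ PySem.Set.add vis col, x ∈ vis2 := pvVisA_mono array _ _ _
        have hlen2 : (PySem.Set.add vis col).length ≤ vis2.length :=
          le_trans (pvSubNodupLen hn1 hm2) (List.toFinset_card_le vis2)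
        have hf2 : array.flatten.toFinset.card + 1 ≤ (f + 1) + vis2.length := by omega
        obtain ⟨C1, C2⟩ := ihc vis2 hn2 hv2 hrU hf2
        have hmono : ∀ x ∈ vis2, x ∈ pvVisA array (f + 1) rest vis2 := pvVisA_mono array _ _ _
        refine ⟨?_, ?_⟩
        · intro x hx
          rcases List.mem_cons.1 hx with rfl | hx
          · exact hmono _ (hm2 _ ((PySem.Set.mem_add _ _ _).2 (Or.inr rfl)))
          · exact C1 x hx
        · intro x hx
          rcases C2 x hx with h | h
          · rcases D2 x h with h2 | h2
            · rcases (PySem.Set.mem_add _ _ _).1 h2 with h3 | rfl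
              · exact Or.inl h3
              · exact Or.inr (fun y hy => hmono _ (D1 y hy))
            · exact Or.inr (fun y hy => hmono _ (h2 y hy))
          · exact Or.inr h


lemma pvMemNextRow (seen : PySem.Set Int) :
    ∀ (cs : List Int) (nxt : PySem.Set Int) (x : Int),
      x ∈ pvNextRow seen cs nxt ↔ x ∈ nxt ∨ (x ∈ cs ∧ x ∉ seen) := by
  intro cs
  induction cs with
  | nil => intro nxt x; simp [pvNextRow]
  | cons c rest ih =>
    intro nxt x
    rw [pvNextRow, ih]
    by_cases hc : PySem.Set.contains seen c
    · have hcs : c ∈ seen := (PySem.Set.contains_iff _ _).1 hc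
      rw [if_pos hc]
      constructor
      · rintro (h | h)
        · exact Or.inl h
        · exact Or.inr ⟨List.mem_cons_of_mem _ h.1, h.2⟩
      · rintro (h | ⟨h1, h2⟩)
        · exact Or.inl h
        · rcases List.mem_cons.1 h1 with rfl | h1
          · exact absurd hcs h2
          · exact Or.inr ⟨h1, h2⟩
    · have hcs : c ∉ seen := fun hm => hc ((PySem.Set.contains_iff _ _).2 hm)
      rw [if_neg hc]
      constructor
      · rintro (h | h)
        · rcases (PySem.Set.mem_add _ _ _).1 h with h1 | rfl
          · exact Or.inl h1
          · exact Or.inr ⟨List.mem_cons_self, hcs⟩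
        · exact Or.inr ⟨List.mem_cons_of_mem _ h.1, h.2⟩
      · rintro (h | ⟨h1, h2⟩)
        · exact Or.inl ((PySem.Set.mem_add _ _ _).2 (Or.inl h))
        · rcases List.mem_cons.1 h1 with rfl | h1
          · exact Or.inl ((PySem.Set.mem_add _ _ _).2 (Or.inr rfl))
          · exact Or.inr ⟨h1, h2⟩

lemma pvNodupNextRow (seen : PySem.Set Int) :
    ∀ (cs : List Int) (nxt : PySem.Set Int), nxt.Nodup → (pvNextRow seen cs nxt).Nodup := by
  intro cs
  induction cs with
  | nil => intro nxt h; simpa [pvNextRow] using h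
  | cons c rest ih =>
    intro nxt h
    rw [pvNextRow]
    by_cases hc : PySem.Set.contains seen c
    · rw [if_pos hc]; exact ih nxt h
    · rw [if_neg hc]; exact ih _ (PySem.Set.nodup_add nxt c h)

lemma pvMemNext (array : List (List Int)) (seen : PySem.Set Int) :
    ∀ (fr : List Int) (nxt : PySem.Set Int) (x : Int),
      x ∈ pvNext array seen fr nxt ↔ x ∈ nxt ∨ ∃ v ∈ fr, x ∈ pvNb array v ∧ x ∉ seen := by
  intro fr
  induction fr with
  | nil => intro nxt x; simp [pvNext]
  | cons v rest ih =>
    intro nxt x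
    rw [pvNext, ih, pvMemNextRow]
    constructor
    · rintro ((h | h) | ⟨w, hw, h⟩)
      · exact Or.inl h
      · exact Or.inr ⟨v, List.mem_cons_self, h⟩
      · exact Or.inr ⟨w, List.mem_cons_of_mem _ hw, h⟩
    · rintro (h | ⟨w, hw, h⟩)
      · exact Or.inl (Or.inl h)
      · rcases List.mem_cons.1 hw with rfl | hw
        · exact Or.inl (Or.inr h)
        · exact Or.inr ⟨w, hw, h⟩

lemma pvNodupNext (array : List (List Int)) (seen : PySem.Set Int) :
    ∀ (fr : List Int) (nxt : PySem.Set Int), nxt.Nodup → (pvNext array seen fr nxt).Nodup := by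
  intro fr
  induction fr with
  | nil => intro nxt h; simpa [pvNext] using h
  | cons v rest ih =>
    intro nxt h
    rw [pvNext]
    exact ih _ (pvNodupNextRow seen _ nxt h)

lemma pvLoopB_main (array : List (List Int)) (cols0 : List Int) :
    ∀ (f : Nat) (seen frontier : PySem.Set Int),
      seen.Nodup →
      (∀ x ∈ seen, x ∈ array.flatten) →
      (∀ x ∈ frontier, x ∈ seen) →
      (∀ x ∈ seen, x ∉ frontier → ∀ y ∈ pvNb array x, y ∈ seen) →
      (∀ x ∈ seen, pvRchL array cols0 x) →
      array.flatten.toFinset.card + 2 ≤ f + seen.length →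
      (∀ x ∈ seen, x ∈ pvLoopB array f seen frontier) ∧
      (∀ x ∈ pvLoopB array f seen frontier, pvRchL array cols0 x) ∧
      (∀ x ∈ pvLoopB array f seen frontier, ∀ y ∈ pvNb array x, y ∈ pvLoopB array f seen frontier) := by
  intro f
  induction f with
  | zero =>
    intro seen frontier hn hU _ _ _ hfuel
    have h1 := pvSubNodupLen hn hU
    omega
  | succ f ih =>
    intro seen frontier hn hU hfr hclos hsound hfuel
    by_cases he : frontier.isEmpty
    · rw [pvLoopB, if_pos he]
      have hfe : frontier = [] := List.isEmpty_iff.1 he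
      refine ⟨fun x hx => hx, hsound, ?_⟩
      intro x hx y hy
      exact hclos x hx (by simp [hfe]) y hy
    · simp only [pvLoopB, if_neg he]
      set nxt := pvNext array seen frontier PySem.Set.empty with hnxt
      have hmem : ∀ x, x ∈ nxt ↔ ∃ v ∈ frontier, x ∈ pvNb array v ∧ x ∉ seen := by
        intro x
        rw [hnxt, pvMemNext]
        simp [PySem.Set.empty]
      have hnd : nxt.Nodup := pvNodupNext array seen frontier PySem.Set.empty List.nodup_nil
      have hdisj : ∀ x ∈ nxt, x ∉ seen := fun x hx => ((hmem x).1 hx).choose_spec.2.2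
      have hupd : PySem.Set.update seen nxt = seen ++ nxt :=
        PySem.Set.update_eq_append_of_disjoint seen nxt hnd hdisj
      have hclos2 : ∀ x ∈ seen, ∀ y ∈ pvNb array x, y ∈ seen ∨ y ∈ nxt := by
        intro x hx y hy
        by_cases hys : y ∈ seen
        · exact Or.inl hys
        · by_cases hxf : x ∈ frontier
          · exact Or.inr ((hmem y).2 ⟨x, hxf, hy, hys⟩)
          · exact Or.inl (hclos x hx hxf y hy)
      by_cases hne : nxt = []
      · have hsk : PySem.Set.update seen nxt = seen := by rw [hupd, hne]; simp
        obtain ⟨f', rfl⟩ : ∃ f', f = f' + 1 := by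
          have h1 := pvSubNodupLen hn hU
          exact ⟨f - 1, by omega⟩
        rw [hsk, hne]
        have hend : pvLoopB array (f' + 1) seen [] = seen := by
          rw [pvLoopB]
          simp
        rw [hend]
        refine ⟨fun x hx => hx, hsound, ?_⟩
        intro x hx y hy
        rcases hclos2 x hx y hy with h | h
        · exact h
        · rw [hne] at h; simp at h
      · have hlen : seen.length + 1 ≤ (PySem.Set.update seen nxt).length := by
          rw [hupd]
          have := List.length_pos_iff.2 hne
          simp only [List.length_append]
          omega
        have hn' : (PySem.Set.update seen nxt).Nodup := by
          rw [hupd]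
          exact List.Nodup.append hn hnd (fun a ha hb => hdisj a hb ha)
        have hU' : ∀ x ∈ PySem.Set.update seen nxt, x ∈ array.flatten := by
          rw [hupd]
          intro x hx
          rcases List.mem_append.1 hx with h | h
          · exact hU x h
          · obtain ⟨v, _, hv2, _⟩ := (hmem x).1 h
            exact pvNb_subset array v x hv2
        have hfr' : ∀ x ∈ nxt, x ∈ PySem.Set.update seen nxt := by
          rw [hupd]; intro x hx; exact List.mem_append.2 (Or.inr hx)
        have hclos' : ∀ x ∈ PySem.Set.update seen nxt, x ∉ nxt →
            ∀ y ∈ pvNb array x, y ∈ PySem.Set.update seen nxt := by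
          rw [hupd]
          intro x hx hxn y hy
          have hxs : x ∈ seen := by
            rcases List.mem_append.1 hx with h | h
            · exact h
            · exact absurd h hxn
          exact List.mem_append.2 (hclos2 x hxs y hy)
        have hsound' : ∀ x ∈ PySem.Set.update seen nxt, pvRchL array cols0 x := by
          rw [hupd]
          intro x hx
          rcases List.mem_append.1 hx with h | h
          · exact hsound x h
          · obtain ⟨v, hv1, hv2, _⟩ := (hmem x).1 h
            exact pvRchL.step (hsound v (hfr v hv1)) hv2
        have hfuel' : array.flatten.toFinset.card + 2 ≤ f + (PySem.Set.update seen nxt).length := by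
          omega
        obtain ⟨I1, I2, I3⟩ := ih (PySem.Set.update seen nxt) nxt hn' hU' hfr' hclos' hsound' hfuel'
        refine ⟨?_, I2, I3⟩
        intro x hx
        exact I1 x (by rw [hupd]; exact List.mem_append.2 (Or.inl hx))

lemma pvSB_iff (array : List (List Int)) (i x : Int) :
    x ∈ pvLoopB array (array.flatten.length + 2) (PySem.Set.ofList (pvNb array i))
        (PySem.Set.ofList (pvNb array i)) ↔
      pvRchL array (pvNb array i) x := by
  have hsub : ∀ y ∈ PySem.Set.ofList (pvNb array i), y ∈ pvNb array i := by
    intro y hy; exact (PySem.Set.mem_ofList _ _).1 hy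
  have hyp := pvLoopB_main array (pvNb array i) (array.flatten.length + 2)
    (PySem.Set.ofList (pvNb array i)) (PySem.Set.ofList (pvNb array i))
    (PySem.Set.nodup_ofList _)
    (fun y hy => pvNb_subset array i y (hsub y hy))
    (fun y hy => hy)
    (fun y hy hy2 => absurd hy hy2)
    (fun y hy => pvRchL.base (hsub y hy))
    (by have := List.toFinset_card_le array.flatten; omega)
  constructor
  · intro hx
    exact hyp.2.1 x hx
  · intro hx
    induction hx with
    | base hb => exact hyp.1 _ ((PySem.Set.mem_ofList _ _).2 hb)
    | step _ hnb ih => exact hyp.2.2 _ ih _ hnb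


lemma pvUpdA_fst (array : List (List Int)) :
    ∀ (f : Nat) (cols : List Int) (row : Int) (vis : PySem.Set Int) (mat : List (List Int)),
      (pvUpdA array f cols row vis mat).1 = pvVisA array f cols vis := by
  intro f
  induction f with
  | zero => intro cols row vis mat; cases cols <;> simp [pvUpdA, pvVisA]
  | succ f ihf =>
    intro cols
    induction cols with
    | nil => intro row vis mat; simp [pvUpdA, pvVisA]
    | cons col rest ihc =>
      intro row vis mat
      by_cases hcol : PySem.Set.contains vis col
      · rw [pvUpdA, pvVisA, if_pos hcol, if_pos hcol]
        exact ihc row vis mat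
      · simp only [pvUpdA, pvVisA, if_neg hcol]
        rw [ihc, ihf]

lemma pvGetRow (mat : List (List Int)) (row : Int) (h : 0 ≤ row) :
    PySem.List.pyGetD mat row [] = mat[row.toNat]?.getD [] := by
  unfold PySem.List.pyGetD PySem.List.pyGet? PySem.List.pyIdx?
  by_cases hr : row < (mat.length : Int)
  · rw [if_pos h, if_pos hr]; rfl
  · rw [if_pos h, if_neg hr]
    have : mat[row.toNat]? = none := by
      rw [List.getElem?_eq_none_iff]; omega
    simp [this]

lemma pvSetDNil (c v : Int) : PySem.List.pySetD ([] : List Int) c v = [] := by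
  unfold PySem.List.pySetD PySem.List.pySet? PySem.List.pyIdx?
  split_ifs with h1 h2 h3 <;> simp_all


lemma pvUpdA_mat (array : List (List Int)) :
    ∀ (f : Nat) (cols : List Int) (row : Int) (vis : PySem.Set Int) (mat : List (List Int)),
      0 ≤ row →
      ((pvUpdA array f cols row vis mat).2.length = mat.length) ∧
      (∀ j : Nat, j ≠ row.toNat → (pvUpdA array f cols row vis mat).2[j]? = mat[j]?) ∧
      (((pvUpdA array f cols row vis mat).2[row.toNat]?.getD []).length
          = (mat[row.toNat]?.getD []).length) ∧
      (∀ k : Nat, ((pvUpdA array f cols row vis mat).2[row.toNat]?.getD [])[k]? =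
          if ∃ c ∈ pvVisA array f cols vis, c ∉ vis ∧
              PySem.List.pyIdx? (mat[row.toNat]?.getD []).length c = some k
          then some 1 else (mat[row.toNat]?.getD [])[k]?) := by
  intro f
  induction f with
  | zero =>
    intro cols row vis mat h0
    cases cols <;>
      refine ⟨by simp [pvUpdA], fun j hj => by simp [pvUpdA], by simp [pvUpdA], fun k => ?_⟩ <;>
      · simp only [pvUpdA, pvVisA]
        rw [if_neg (by rintro ⟨c, hc1, hc2, _⟩; exact hc2 hc1)]
  | succ f ihf =>
    intro cols
    induction cols with
    | nil =>
      intro row vis mat h0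
      refine ⟨by simp [pvUpdA], fun j hj => by simp [pvUpdA], by simp [pvUpdA], fun k => ?_⟩
      simp only [pvUpdA, pvVisA]
      rw [if_neg (by rintro ⟨c, hc1, hc2, _⟩; exact hc2 hc1)]
    | cons col rest ihc =>
      intro row vis mat h0
      by_cases hcol : PySem.Set.contains vis col
      · simp only [pvUpdA, pvVisA, if_pos hcol]
        exact ihc row vis mat h0
      · have hcol' : col ∉ vis := fun hm => hcol ((PySem.Set.contains_iff _ _).2 hm)
        simp only [pvUpdA, pvVisA, if_neg hcol]
        set R := row.toNat with hR
        set rowOld := mat[R]?.getD [] with hrowOld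
        set mat' := PySem.List.pySetD mat row (PySem.List.pySetD (PySem.List.pyGetD mat row []) col 1) with hmat'
        have hwr : PySem.List.pyGetD mat row [] = rowOld := pvGetRow mat row h0
        have hrowmat' : mat'[R]?.getD [] = PySem.List.pySetD rowOld col 1 := by
          rw [hmat', hwr, pvSetRow_getElem? mat row _ R h0]
          by_cases hr : R < mat.length
          · rw [if_pos ⟨rfl, hr⟩, Option.getD_some]
          · rw [if_neg (by rintro ⟨_, h2⟩; exact hr h2)]
            have hnone : mat[R]? = none := by rw [List.getElem?_eq_none_iff]; omega
            rw [hrowOld, hnone]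
            simp [pvSetDNil]
        have hlen' : (mat'[R]?.getD []).length = rowOld.length := by
          rw [hrowmat', PySem.List.length_pySetD]
        have hmatlen' : mat'.length = mat.length := PySem.List.length_pySetD _ _ _
        have hothers' : ∀ j : Nat, j ≠ R → mat'[j]? = mat[j]? := by
          intro j hj
          rw [hmat', pvSetRow_getElem? mat row _ j h0]
          rw [if_neg (by rintro ⟨h1, _⟩; exact hj h1)]
        obtain ⟨D1, D2, D3, D4⟩ := ihf (pvNb array col) row (PySem.Set.add vis col) mat' h0
        set st := pvUpdA array f (pvNb array col) row (PySem.Set.add vis col) mat' with hst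
        obtain ⟨C1, C2, C3, C4⟩ := ihc row st.1 st.2 h0
        have hfst : st.1 = pvVisA array f (pvNb array col) (PySem.Set.add vis col) :=
          pvUpdA_fst array f _ row _ mat'
        set vis1 := PySem.Set.add vis col with hvis1
        set vis2 := pvVisA array f (pvNb array col) vis1 with hvis2
        set fin := pvVisA array (f + 1) rest vis2 with hfin
        have hm01 : ∀ x ∈ vis, x ∈ vis1 := fun x hx => (PySem.Set.mem_add _ _ _).2 (Or.inl hx)
        have hmc1 : col ∈ vis1 := (PySem.Set.mem_add _ _ _).2 (Or.inr rfl)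
        have hm12 : ∀ x ∈ vis1, x ∈ vis2 := pvVisA_mono array _ _ _
        have hm2f : ∀ x ∈ vis2, x ∈ fin := pvVisA_mono array _ _ _
        refine ⟨?_, ?_, ?_, ?_⟩
        · rw [C1, D1, hmatlen']
        · intro j hj
          rw [C2 j hj, D2 j hj, hothers' j hj]
        · rw [C3, D3, hlen']
        · intro k
          have hVeq : pvVisA array (f + 1) rest st.1 = fin := by rw [hfst]
          have hC4 := C4 k
          rw [hVeq, D3, hlen'] at hC4
          rw [hC4]
          have hD4 := D4 k
          rw [hlen'] at hD4
          rw [hD4, hrowmat', pvMark_getElem?]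
          set Hit := PySem.List.pyIdx? rowOld.length col = some k with hHit
          set Mid := ∃ c ∈ vis2, c ∉ vis1 ∧ PySem.List.pyIdx? rowOld.length c = some k with hMid
          set Rgt := ∃ c ∈ fin, c ∉ st.1 ∧ PySem.List.pyIdx? rowOld.length c = some k with hRgt
          set Big := ∃ c ∈ fin, c ∉ vis ∧ PySem.List.pyIdx? rowOld.length c = some k with hBig
          have hRgt' : Rgt = ∃ c ∈ fin, c ∉ vis2 ∧ PySem.List.pyIdx? rowOld.length c = some k := by
            rw [hRgt, hfst]
          have hbig : Big ↔ Hit ∨ Mid ∨ Rgt := by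
            rw [hRgt']
            constructor
            · rintro ⟨c, hcf, hcv, hidx⟩
              by_cases h2 : c ∈ vis2
              · by_cases h1 : c ∈ vis1
                · rcases (PySem.Set.mem_add _ _ _).1 h1 with h3 | rfl
                  · exact absurd h3 hcv
                  · exact Or.inl hidx
                · exact Or.inr (Or.inl ⟨c, h2, h1, hidx⟩)
              · exact Or.inr (Or.inr ⟨c, hcf, h2, hidx⟩)
            · rintro (h | ⟨c, hc2, hc1, hidx⟩ | ⟨c, hcf, hc2, hidx⟩)
              · exact ⟨col, hm2f _ (hm12 _ hmc1), hcol', h⟩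
              · exact ⟨c, hm2f _ hc2, fun hv => hc1 (hm01 _ hv), hidx⟩
              · exact ⟨c, hcf, fun hv => hc2 (hm12 _ (hm01 _ hv)), hidx⟩
          by_cases h1 : Rgt
          · rw [if_pos h1, if_pos (hbig.2 (Or.inr (Or.inr h1)))]
          · rw [if_neg h1]
            by_cases h2 : Mid
            · rw [if_pos h2, if_pos (hbig.2 (Or.inr (Or.inl h2)))]
            · rw [if_neg h2]
              by_cases h3 : Hit
              · rw [if_pos h3, if_pos (hbig.2 (Or.inl h3))]
              · rw [if_neg h3, if_neg (fun hb => by rcases hbig.1 hb with h | h | h <;> tauto)]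


lemma pvFoldA_pair (array : List (List Int)) (fuel : Nat) :
    ∀ (l : List Int) (mat : List (List Int)),
      (l.foldl (fun st i => ((PySem.Set.empty : PySem.Set Int),
          (pvUpdA array fuel (pvNb array i) i st.1 st.2).2))
        ((PySem.Set.empty : PySem.Set Int), mat))
      = (PySem.Set.empty,
         l.foldl (fun m i => (pvUpdA array fuel (pvNb array i) i PySem.Set.empty m).2) mat) := by
  intro l
  induction l with
  | nil => intro mat; rfl
  | cons i rest ih => intro mat; simp only [List.foldl_cons]; exact ih _

lemma pvFoldAppend {α β : Type} (g : α → β) :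
    ∀ (l : List α) (acc : List β), l.foldl (fun mat i => mat ++ [g i]) acc = acc ++ l.map g := by
  intro l
  induction l with
  | nil => intro acc; simp
  | cons i rest ih => intro acc; simp [ih]

lemma pvMarkFold_get :
    ∀ (L r : List Int) (k : Nat),
      (L.foldl (fun r c => PySem.List.pySetD r c 1) r)[k]? =
        if ∃ c ∈ L, PySem.List.pyIdx? r.length c = some k then some 1 else r[k]? := by
  intro L
  induction L with
  | nil =>
    intro r k
    simp
  | cons c L ih =>
    intro r k
    simp only [List.foldl_cons]
    rw [ih, PySem.List.length_pySetD, pvMark_getElem?]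
    by_cases h1 : ∃ c' ∈ L, PySem.List.pyIdx? r.length c' = some k
    · rw [if_pos h1]
      rcases h1 with ⟨c', hc1, hc2⟩
      rw [if_pos ⟨c', List.mem_cons_of_mem _ hc1, hc2⟩]
    · rw [if_neg h1]
      by_cases h2 : PySem.List.pyIdx? r.length c = some k
      · rw [if_pos h2, if_pos ⟨c, List.mem_cons_self, h2⟩]
      · rw [if_neg h2, if_neg ?_]
        rintro ⟨c', hc1, hc2⟩
        rcases List.mem_cons.1 hc1 with rfl | hc1
        · exact h2 hc2
        · exact h1 ⟨c', hc1, hc2⟩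

lemma pvConstMap_get {β : Type} (x : β) (n k : Nat) :
    ((PySem.List.pyRange 0 (n : Int) 1).map (fun _ => x))[k]? =
      if k < n then some x else none := by
  have hlen : ((PySem.List.pyRange 0 (n : Int) 1).map (fun _ => x)).length = n := by
    rw [List.length_map, PySem.List.length_pyRange_one]
    simp
  by_cases hk : k < n
  · rw [if_pos hk]
    simp only [List.getElem?_eq_getElem (show k < ((PySem.List.pyRange 0 (n : Int) 1).map (fun _ => x)).length by omega)]
    simp
  · rw [if_neg hk, List.getElem?_eq_none_iff]
    omega

-- Bool form of "start j has already run and some visited column of start j hits cell k"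
def pvHitA (array : List (List Int)) (j k m : Nat) : Bool :=
  decide (j < m) &&
    (pvVisA array (array.flatten.length + 1) (pvNb array (j : Int)) PySem.Set.empty).any
      (fun c => PySem.List.pyIdx? array.length c == some k)

lemma pvHitA_iff (array : List (List Int)) (j k m : Nat) :
    pvHitA array j k m = true ↔
      j < m ∧ ∃ c ∈ pvVisA array (array.flatten.length + 1) (pvNb array (j : Int)) PySem.Set.empty,
        PySem.List.pyIdx? array.length c = some k := by
  simp [pvHitA]

-- the matrix after the first m starts of A's outer loop
def pvMatA (array : List (List Int)) (m : Nat) : List (List Int) :=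
  (PySem.List.pyRange 0 (m : Int) 1).foldl
    (fun mat i => (pvUpdA array (array.flatten.length + 1) (pvNb array i) i PySem.Set.empty mat).2)
    ((PySem.List.pyRange 0 (array.length : Int) 1).map
      (fun _ => (PySem.List.pyRange 0 (array.length : Int) 1).map (fun _ => (0 : Int))))

lemma pvFoldA_char (array : List (List Int)) :
    ∀ (m : Nat), m ≤ array.length →
      (pvMatA array m).length = array.length ∧
      (∀ j : Nat, j < array.length → ((pvMatA array m)[j]?.getD []).length = array.length) ∧
      (∀ j k : Nat, ((pvMatA array m)[j]?.getD [])[k]? =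
          if j < array.length ∧ k < array.length then
            some (if pvHitA array j k m then 1 else 0)
          else none) := by
  intro m
  induction m with
  | zero =>
    intro _
    have h0 : pvMatA array 0 =
        (PySem.List.pyRange 0 (array.length : Int) 1).map
          (fun _ => (PySem.List.pyRange 0 (array.length : Int) 1).map (fun _ => (0 : Int))) := by
      unfold pvMatA
      rw [PySem.List.pyRange_one_eq_nil (a := 0) (b := ((0 : Nat) : Int)) (by simp)]
      rfl
    rw [h0]
    refine ⟨by simp [PySem.List.length_pyRange_one], ?_, ?_⟩
    · intro j hj
      rw [pvConstMap_get _ array.length j, if_pos hj]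
      simp [PySem.List.length_pyRange_one]
    · intro j k
      rw [pvConstMap_get _ array.length j]
      by_cases hj : j < array.length
      · rw [if_pos hj]
        simp only [Option.getD_some]
        rw [pvConstMap_get _ array.length k]
        by_cases hk : k < array.length
        · rw [if_pos hk, if_pos ⟨hj, hk⟩]
          simp [pvHitA]
        · rw [if_neg hk, if_neg (by tauto)]
      · rw [if_neg hj, if_neg (by tauto)]
        simp
  | succ m ihm =>
    intro hm
    obtain ⟨I1, I2, I3⟩ := ihm (by omega)
    have hmn : m < array.length := by omega
    have hstep : pvMatA array (m + 1) =
        (pvUpdA array (array.flatten.length + 1) (pvNb array (m : Int)) (m : Int)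
          PySem.Set.empty (pvMatA array m)).2 := by
      unfold pvMatA
      have hc : ((m + 1 : Nat) : Int) = (m : Int) + 1 := by push_cast; ring
      rw [hc, PySem.List.pyRange_one_succ_right (by positivity), List.foldl_append]
      rfl
    obtain ⟨U1, U2, U3, U4⟩ := pvUpdA_mat array (array.flatten.length + 1) (pvNb array (m : Int))
      (m : Int) PySem.Set.empty (pvMatA array m) (by positivity)
    have hR : ((m : Int)).toNat = m := Int.toNat_natCast m
    rw [hR] at U2 U3 U4
    refine ⟨by rw [hstep, U1, I1], ?_, ?_⟩
    · intro j hj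
      rw [hstep]
      by_cases hjm : j = m
      · subst hjm; rw [U3]; exact I2 j hj
      · rw [U2 j hjm]; exact I2 j hj
    · intro j k
      rw [hstep]
      by_cases hjm : j = m
      · rw [hjm]
        rw [U4 k, I2 m hmn]
        rw [I3 m k]
        have hnm : pvHitA array m k m = false := by
          unfold pvHitA
          rw [decide_eq_false (by omega : ¬ m < m)]
          simp
        by_cases hex : ∃ c ∈ pvVisA array (array.flatten.length + 1)
            (pvNb array (m : Int)) PySem.Set.empty,
            c ∉ (PySem.Set.empty : PySem.Set Int) ∧
            PySem.List.pyIdx? array.length c = some k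
        · rw [if_pos hex]
          obtain ⟨c, hc1, _, hc3⟩ := hex
          have hkn : k < array.length := pvIdxLt hc3
          have hh : pvHitA array m k (m + 1) = true :=
            (pvHitA_iff array m k (m + 1)).2 ⟨by omega, c, hc1, hc3⟩
          rw [if_pos ⟨hmn, hkn⟩, hh]
          simp
        · rw [if_neg hex]
          by_cases hk : k < array.length
          · rw [if_pos ⟨hmn, hk⟩, hnm]
            have hh : pvHitA array m k (m + 1) = false := by
              rw [← Bool.not_eq_true, pvHitA_iff]
              rintro ⟨_, c, hc1, hc3⟩
              exact hex ⟨c, hc1, by simp [PySem.Set.empty], hc3⟩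
            rw [hh]
            simp
            exact ⟨hmn, hk⟩
          · have hnot : ¬ (m < array.length ∧ k < array.length) := by tauto
            rw [if_neg hnot, if_neg hnot]
      · rw [U2 j (by simpa [hR] using hjm), I3 j k]
        by_cases hjk : j < array.length ∧ k < array.length
        · rw [if_pos hjk, if_pos hjk]
          have : pvHitA array j k (m + 1) = pvHitA array j k m := by
            unfold pvHitA
            congr 1
            exact decide_eq_decide.2 (by omega)
          rw [this]
        · rw [if_neg hjk, if_neg hjk]

-- membership in A's visited set for start node i = reachability
lemma pvSA_iff (array : List (List Int)) (i x : Int) :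
    x ∈ pvVisA array (array.flatten.length + 1) (pvNb array i) PySem.Set.empty ↔
      pvRchL array (pvNb array i) x := by
  constructor
  · intro hx
    rcases pvVisA_sound array _ _ _ _ hx with h | h
    · simp [PySem.Set.empty] at h
    · exact h
  · intro hx
    have hyp := pvVisA_closed array (array.flatten.length + 1) (pvNb array i) PySem.Set.empty
      (by simp [PySem.Set.empty]) (by simp [PySem.Set.empty]) (pvNb_subset array i)
      (by have := List.toFinset_card_le array.flatten; simp only [PySem.Set.empty, List.length_nil]; omega)
    induction hx with
    | base hb => exact hyp.1 _ hb
    | step _ hnb ih =>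
      rcases hyp.2 _ ih with h | h
      · simp [PySem.Set.empty] at h
      · exact h _ hnb


-- ===== VERDICT (by name: the statement is the Claim_ definition above) =====
theorem get_matrix2_spec : Claim_equal_get_matrix2 := by
  intro array _ _
  show get_matrix2 array = get_matrix2_alt array
  have hA : get_matrix2 array = pvMatA array array.length := by
    simp only [get_matrix2, pvMatA]
    rw [pvFoldA_pair array (array.flatten.length + 1)]
  have hB : get_matrix2_alt array =
      (PySem.List.pyRange 0 (array.length : Int) 1).map
        (fun i => pvRowB (array.length : Int)
          (pvLoopB array (array.flatten.length + 2)
            (PySem.Set.ofList (pvNb array i)) (PySem.Set.ofList (pvNb array i)))) := by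
    simp only [get_matrix2_alt, PySem.Set.ofList_ofList]
    rw [pvFoldAppend]
    simp
  obtain ⟨C1, C2, C3⟩ := pvFoldA_char array array.length (le_refl _)
  rw [hA, hB]
  apply List.ext_getElem?
  intro j
  have hmaplen : ((PySem.List.pyRange 0 (array.length : Int) 1).map
      (fun i => pvRowB (array.length : Int)
        (pvLoopB array (array.flatten.length + 2)
          (PySem.Set.ofList (pvNb array i)) (PySem.Set.ofList (pvNb array i))))).length
      = array.length := by
    rw [List.length_map, PySem.List.length_pyRange_one]
    simp
  by_cases hj : j < array.length
  · have hAj : (pvMatA array array.length)[j]? = some ((pvMatA array array.length)[j]'(by omega)) :=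
      List.getElem?_eq_getElem (by omega)
    have hBj : ((PySem.List.pyRange 0 (array.length : Int) 1).map
        (fun i => pvRowB (array.length : Int)
          (pvLoopB array (array.flatten.length + 2)
            (PySem.Set.ofList (pvNb array i)) (PySem.Set.ofList (pvNb array i)))))[j]?
        = some (pvRowB (array.length : Int)
            (pvLoopB array (array.flatten.length + 2)
              (PySem.Set.ofList (pvNb array (j : Int))) (PySem.Set.ofList (pvNb array (j : Int))))) := by
      rw [List.getElem?_map, PySem.List.getElem?_pyRange_one]
      rw [if_pos (by simpa using hj)]
      simp
    rw [hAj, hBj]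
    congr 1
    apply List.ext_getElem?
    intro k
    have hrowA : ((pvMatA array array.length)[j]'(by omega))[k]? =
        ((pvMatA array array.length)[j]?.getD [])[k]? := by rw [hAj]; rfl
    rw [hrowA, C3 j k]
    unfold pvRowB
    rw [pvMarkFold_get]
    rw [List.length_replicate]
    have hnn : ((array.length : Int)).toNat = array.length := Int.toNat_natCast _
    rw [hnn]
    have hiff : (∃ c ∈ pvLoopB array (array.flatten.length + 2)
          (PySem.Set.ofList (pvNb array (j : Int))) (PySem.Set.ofList (pvNb array (j : Int))),
          PySem.List.pyIdx? array.length c = some k)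
        ↔ pvHitA array j k array.length = true := by
      rw [pvHitA_iff]
      constructor
      · rintro ⟨c, hc1, hc2⟩
        exact ⟨hj, c, (pvSA_iff array (j : Int) c).2 ((pvSB_iff array (j : Int) c).1 hc1), hc2⟩
      · rintro ⟨_, c, hc1, hc2⟩
        exact ⟨c, (pvSB_iff array (j : Int) c).2 ((pvSA_iff array (j : Int) c).1 hc1), hc2⟩
    by_cases hex : ∃ c ∈ pvLoopB array (array.flatten.length + 2)
        (PySem.Set.ofList (pvNb array (j : Int))) (PySem.Set.ofList (pvNb array (j : Int))),
        PySem.List.pyIdx? array.length c = some k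
    · have hkn : k < array.length := by
        obtain ⟨c, _, hc2⟩ := hex
        exact pvIdxLt hc2
      rw [if_pos hex, if_pos ⟨hj, hkn⟩, hiff.1 hex]
      simp
    · rw [if_neg hex, List.getElem?_replicate]
      by_cases hk : k < array.length
      · rw [if_pos ⟨hj, hk⟩, if_pos hk]
        have : pvHitA array j k array.length = false := by
          rw [← Bool.not_eq_true]
          intro h
          exact hex (hiff.2 h)
        rw [this]
        simp
      · rw [if_neg (by tauto), if_neg hk]
  · rw [List.getElem?_eq_none_iff.2 (by omega), List.getElem?_eq_none_iff.2 (by omega)]
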